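-- pv_equiv track=rewrite | github.com/albarppt/kk-project | helper/word_helpers.py | remove_leading_single_character
-- ===== SOURCE A (Python) =====
-- def remove_leading_single_character(text):
--     words = text.split(" ")
--
--     result = []
--
--     for word in words:
--         if len(word) == 1 and len(result) == 0:
--             continue
--
--         result.append(word)
--
--     return " ".join(result)
-- ===== SOURCE B (Python) =====
-- def remove_leading_single_character(text):
--     while True:
--         head, sep, tail = text.partition(" ")
--         if len(head) != 1:
--             return text
--         if not sep:
--             return ""
--         text = tail
-- ===== Notes on version B (the rewrite author's own statement) =====
-- stated objective: alternative
-- what changed: B never builds a word list: it works on the string itself with str.partition, chopping one leading single-character word (and its following space) per iteration and returning the remaining suffix of the text unchanged, where A splits into a list, filters into an accumulator and rejoins.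
import Mathlib
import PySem

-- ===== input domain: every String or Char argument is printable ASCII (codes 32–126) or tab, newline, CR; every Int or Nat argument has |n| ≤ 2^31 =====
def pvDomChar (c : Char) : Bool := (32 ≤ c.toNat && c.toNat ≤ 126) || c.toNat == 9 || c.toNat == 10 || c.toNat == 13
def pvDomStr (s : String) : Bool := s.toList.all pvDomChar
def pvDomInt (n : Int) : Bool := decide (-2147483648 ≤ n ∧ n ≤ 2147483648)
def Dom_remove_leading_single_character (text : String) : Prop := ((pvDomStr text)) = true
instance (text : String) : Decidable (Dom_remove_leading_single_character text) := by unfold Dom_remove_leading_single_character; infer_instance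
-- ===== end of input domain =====

-- B replaces A's split/filter/join over a word list by repeated str.partition on the text itself, returning a suffix of the input (alternative decomposition, not claimed faster).


-- ===== PORT A =====
def remove_leading_single_character (text : String) : String :=
  let words := (PySem.Str.split? text " ").getD []
  let result := words.foldl
    (fun result word =>
      if PySem.Str.len word == 1 && result.length == 0 then result
      else result ++ [word]) []
  PySem.Str.join " " result

-- ===== PORT B =====
-- B's while-loop on the char list; text.partition(" ") is ported by hand (exact:
-- head = chars before the first ' '; sep nonempty iff a ' ' occurs, i.e. rest ≠ [];
-- tail = rest.tail, the chars after that first space).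
def pvAltGo (cs : List Char) : List Char :=
  let head := cs.takeWhile (fun c => c ≠ ' ')
  let rest := cs.dropWhile (fun c => c ≠ ' ')
  if head.length ≠ 1 then cs
  else if h : rest = [] then []      -- sep empty: whole text is one single-char word
  else pvAltGo rest.tail
termination_by cs.length
decreasing_by
  have hle := List.length_dropWhile_le (p := fun c => decide (c ≠ ' ')) (l := cs)
  have hpos : 0 < (cs.dropWhile (fun c => decide (c ≠ ' '))).length :=
    List.length_pos_of_ne_nil h
  simp only [List.length_tail]
  omega

def remove_leading_single_character_alt (text : String) : String :=
  String.ofList (pvAltGo text.toList)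

-- ===== PRECONDITION & SPEC =====
def Spec_remove_leading_single_character (text : String) (out : String) : Prop := out = remove_leading_single_character_alt text
instance (text : String) (out : String) : Decidable (Spec_remove_leading_single_character text out) := by unfold Spec_remove_leading_single_character; infer_instance

-- ===== CLAIM =====
def Claim_equal_remove_leading_single_character : Prop := ∀ (text : String), Dom_remove_leading_single_character text → Spec_remove_leading_single_character text (remove_leading_single_character text)

-- ===== LEMMAS AND PROOFS =====

-- reference recursive characterisation of split-on-single-space
def mySplit (cs : List Char) : List (List Char) :=
  let rest := cs.dropWhile (fun c => c ≠ ' ')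
  if h : rest = [] then [cs]
  else cs.takeWhile (fun c => c ≠ ' ') :: mySplit rest.tail
termination_by cs.length
decreasing_by
  have hle := List.length_dropWhile_le (p := fun c => decide (c ≠ ' ')) (l := cs)
  have hpos : 0 < (cs.dropWhile (fun c => decide (c ≠ ' '))).length :=
    List.length_pos_of_ne_nil h
  simp only [List.length_tail]
  omega

theorem mySplit_ne_nil (cs : List Char) : mySplit cs ≠ [] := by
  rw [mySplit]
  split <;> simp

theorem mySplit_cons_space (rest : List Char) : mySplit (' ' :: rest) = [] :: mySplit rest := by
  rw [mySplit]
  simp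

theorem mySplit_cons_of_ne (c : Char) (rest : List Char) (hc : c ≠ ' ') :
    mySplit (c :: rest) = List.modifyHead (fun x => c :: x) (mySplit rest) := by
  have hdc : List.dropWhile (fun c => decide (c ≠ ' ')) (c :: rest)
      = List.dropWhile (fun c => decide (c ≠ ' ')) rest := by
    rw [List.dropWhile_cons]
    simp [hc]
  have htc : List.takeWhile (fun c => decide (c ≠ ' ')) (c :: rest)
      = c :: List.takeWhile (fun c => decide (c ≠ ' ')) rest := by
    rw [List.takeWhile_cons]
    simp [hc]
  conv_lhs => rw [mySplit]
  conv_rhs => rw [mySplit]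
  simp only [hdc, htc]
  by_cases hrest : List.dropWhile (fun c => decide (c ≠ ' ')) rest = []
  · rw [dif_pos hrest, dif_pos hrest]
    simp
  · rw [dif_neg hrest, dif_neg hrest]
    simp

theorem go_spec (fuel : Nat) : ∀ (l cur : List Char) (acc : List (List Char)), l.length < fuel →
    PySem.Chars.splitOn.go [' '] fuel l cur acc
      = acc.reverse ++ (mySplit l).modifyHead (fun x => cur.reverse ++ x) := by
  induction fuel with
  | zero => intro l cur acc h; omega
  | succ f ih =>
    intro l cur acc h
    cases l with
    | nil =>
      rw [PySem.Chars.splitOn.go, mySplit]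
      · simp
      · omega
    | cons c rest =>
      rw [PySem.Chars.splitOn.go]
      by_cases hc : c = ' '
      · subst hc
        rw [if_pos (by simp [List.isPrefixOf])]
        simp only [List.length_cons, List.length_nil, List.drop_succ_cons, List.drop_zero]
        rw [ih rest [] _ (by simpa using Nat.lt_of_succ_lt_succ h)]
        rw [mySplit_cons_space]
        obtain ⟨a, T, haT⟩ : ∃ a T, mySplit rest = a :: T := by
          cases hx : mySplit rest with
          | nil => exact absurd hx (mySplit_ne_nil _)
          | cons a T => exact ⟨a, T, rfl⟩
        rw [haT]
        simp
      · rw [if_neg (by simp [List.isPrefixOf]; exact fun hh => hc hh.symm)]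
        rw [ih rest (c :: cur) acc (by simpa using Nat.lt_of_succ_lt_succ h)]
        rw [mySplit_cons_of_ne c rest hc]
        obtain ⟨a, T, haT⟩ : ∃ a T, mySplit rest = a :: T := by
          cases hx : mySplit rest with
          | nil => exact absurd hx (mySplit_ne_nil _)
          | cons a T => exact ⟨a, T, rfl⟩
        rw [haT]
        simp

theorem splitOn_space (cs : List Char) : PySem.Chars.splitOn cs [' '] = mySplit cs := by
  show PySem.Chars.splitOn.go [' '] (cs.length + 1) cs [] [] = _
  rw [go_spec (cs.length + 1) cs [] [] (by omega)]
  cases h : mySplit cs <;> simp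

theorem join_mySplit (cs : List Char) : PySem.Chars.join [' '] (mySplit cs) = cs := by
  rw [mySplit]
  by_cases h : List.dropWhile (fun c => decide (c ≠ ' ')) cs = []
  · rw [dif_pos h]
    exact PySem.Chars.join_singleton _ _
  · rw [dif_neg h]
    obtain ⟨d, t, hdt⟩ : ∃ d t, cs.dropWhile (fun c => decide (c ≠ ' ')) = d :: t := by
      cases hx : cs.dropWhile (fun c => decide (c ≠ ' ')) with
      | nil => exact absurd hx h
      | cons d t => exact ⟨d, t, rfl⟩
    have hd : d = ' ' := by
      have h3 := List.head_dropWhile_not (fun c => decide (c ≠ ' ')) (l := cs) h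
      have h5 : (List.dropWhile (fun c => decide (c ≠ ' ')) cs).head? = some d := by
        rw [hdt]
        rfl
      rw [List.head?_eq_some_head h] at h5
      rw [Option.some.inj h5] at h3
      simpa using h3
    obtain ⟨a, T, haT⟩ : ∃ a T, mySplit ((cs.dropWhile (fun c => decide (c ≠ ' '))).tail) = a :: T := by
      cases hx : mySplit ((cs.dropWhile (fun c => decide (c ≠ ' '))).tail) with
      | nil => exact absurd hx (mySplit_ne_nil _)
      | cons a T => exact ⟨a, T, rfl⟩
    rw [haT, PySem.Chars.join_cons_cons, ← haT, join_mySplit]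
    conv_rhs => rw [← List.takeWhile_append_dropWhile (p := fun c => decide (c ≠ ' ')) (l := cs)]
    rw [hdt, hd]
    simp
termination_by cs.length
decreasing_by
  have hle := List.length_dropWhile_le (p := fun c => decide (c ≠ ' ')) (l := cs)
  have hpos : 0 < (cs.dropWhile (fun c => decide (c ≠ ' '))).length :=
    List.length_pos_of_ne_nil h
  simp only [List.length_tail]
  omega

theorem takeWhile_eq_self_of_dropWhile_nil (cs : List Char)
    (h : List.dropWhile (fun c => decide (c ≠ ' ')) cs = []) :
    List.takeWhile (fun c => decide (c ≠ ' ')) cs = cs := by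
  have := List.takeWhile_append_dropWhile (p := fun c => decide (c ≠ ' ')) (l := cs)
  rw [h] at this
  simpa using this

theorem altGo_join (cs : List Char) :
    pvAltGo cs = PySem.Chars.join [' '] ((mySplit cs).dropWhile (fun w => w.length == 1)) := by
  rw [pvAltGo]
  by_cases h1 : (cs.takeWhile (fun c => decide (c ≠ ' '))).length ≠ 1
  · rw [if_pos h1]
    obtain ⟨T, hT⟩ : ∃ T, mySplit cs = cs.takeWhile (fun c => decide (c ≠ ' ')) :: T := by
      rw [mySplit]
      by_cases h : List.dropWhile (fun c => decide (c ≠ ' ')) cs = []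
      · rw [dif_pos h]
        exact ⟨[], by rw [takeWhile_eq_self_of_dropWhile_nil cs h]⟩
      · rw [dif_neg h]
        exact ⟨_, rfl⟩
    rw [hT, List.dropWhile_cons, if_neg (by simpa using h1), ← hT, join_mySplit]
  · rw [if_neg h1]
    have h1' : (cs.takeWhile (fun c => decide (c ≠ ' '))).length = 1 := not_ne_iff.mp h1
    by_cases h : List.dropWhile (fun c => decide (c ≠ ' ')) cs = []
    · rw [dif_pos h]
      rw [mySplit, dif_pos h, List.dropWhile_cons]
      rw [if_pos (by rw [← takeWhile_eq_self_of_dropWhile_nil cs h]; simpa using h1')]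
      simp
    · rw [dif_neg h]
      rw [mySplit, dif_neg h]
      rw [List.dropWhile_cons, if_pos (by simpa using h1')]
      exact altGo_join _
termination_by cs.length
decreasing_by
  have hle := List.length_dropWhile_le (p := fun c => decide (c ≠ ' ')) (l := cs)
  have hpos : 0 < (cs.dropWhile (fun c => decide (c ≠ ' '))).length :=
    List.length_pos_of_ne_nil h
  simp only [List.length_tail]
  omega

-- once the accumulator is nonempty, A's loop appends everything
theorem pvFoldNonempty (ws : List String) (acc : List String) (h : acc ≠ []) :
    ws.foldl (fun result word =>
      if PySem.Str.len word == 1 && result.length == 0 then result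
      else result ++ [word]) acc = acc ++ ws := by
  induction ws generalizing acc with
  | nil => simp
  | cons w rest ih =>
    have hlen : acc.length ≠ 0 := by simpa using h
    simp only [List.foldl_cons]
    rw [if_neg (by simp [hlen]), ih (acc ++ [w]) (by simp)]
    simp

-- from the empty accumulator, A's loop computes dropWhile
theorem pvFoldEmpty (ws : List String) :
    ws.foldl (fun result word =>
      if PySem.Str.len word == 1 && result.length == 0 then result
      else result ++ [word]) [] =
    ws.dropWhile (fun w => PySem.Str.len w == 1) := by
  induction ws with
  | nil => simp
  | cons w rest ih =>
    by_cases hp : PySem.Str.len w == 1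
    · rw [List.foldl_cons, if_pos (by simpa using hp)]
      simp only [List.dropWhile_cons, hp, if_true]
      exact ih
    · rw [List.foldl_cons, if_neg (by simpa using hp)]
      simp only [List.dropWhile_cons, hp, if_false, Bool.false_eq_true]
      rw [pvFoldNonempty rest ([] ++ [w]) (by simp)]
      simp

-- ===== VERDICT =====
theorem remove_leading_single_character_spec : Claim_equal_remove_leading_single_character := by
  intro text _
  unfold Spec_remove_leading_single_character remove_leading_single_character remove_leading_single_character_alt
  show PySem.Str.join " "
      (((PySem.Str.split? text " ").getD []).foldl
        (fun result word =>
          if PySem.Str.len word == 1 && result.length == 0 then result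
          else result ++ [word]) []) = _
  rw [pvFoldEmpty]
  have hwords : (PySem.Str.split? text " ").getD []
      = (PySem.Chars.splitOn text.toList [' ']).map String.ofList := by
    simp [PySem.Str.split?, PySem.Chars.split?]
  rw [hwords, splitOn_space]
  apply String.toList_inj.mp
  rw [PySem.Str.toList_join, String.toList_ofList]
  rw [altGo_join]
  rw [List.dropWhile_map, List.map_map]
  have hpred : ((fun w => PySem.Str.len w == 1) ∘ String.ofList)
      = (fun w : List Char => w.length == 1) := by
    funext w
    simp only [Function.comp_apply, PySem.Str.len, String.toList_ofList]
    rcases eq_or_ne w.length 1 with hw | hw <;> simp [hw]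
  have hmap : ∀ L : List (List Char), L.map (String.toList ∘ String.ofList) = L := by
    intro L
    simp [Function.comp_def]
  rw [hpred, hmap, String.toList_ofList]
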